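-- pv_equiv track=rewrite | github.com/Ginyto/Projet-Theory-Des-Graphes | jarvis.py | is_it_int
-- ===== SOURCE A (Python) =====
-- def is_it_int(x, baro):
--     allow = []
--
--     for i in range(1,baro+1):
--         allow.append(str(i))
--
--     for i in range(len(allow)):
--         if x == allow[i]:
--             return True
--
--     return False
-- ===== SOURCE B (Python) =====
-- def is_it_int(x, baro):
--     # O(len(x)): x matches str(i) for some 1 <= i <= baro iff x is a canonical
--     # decimal numeral (digits only, no leading zero) whose value is in range.
--     if baro < 1 or not x or x[0] == '0':
--         return False
--     n = 0
--     for c in x: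
--         if c < '0' or c > '9':
--             return False
--         n = 10 * n + (ord(c) - 48)
--     return n <= baro
-- ===== Notes on version B (the rewrite author's own statement) =====
-- stated objective: faster
-- what changed: Instead of materialising the list [str(1),...,str(baro)] and scanning it, B checks directly that x is a canonical decimal numeral (digits, no leading zero) and that its value is between 1 and baro.
import Mathlib
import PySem

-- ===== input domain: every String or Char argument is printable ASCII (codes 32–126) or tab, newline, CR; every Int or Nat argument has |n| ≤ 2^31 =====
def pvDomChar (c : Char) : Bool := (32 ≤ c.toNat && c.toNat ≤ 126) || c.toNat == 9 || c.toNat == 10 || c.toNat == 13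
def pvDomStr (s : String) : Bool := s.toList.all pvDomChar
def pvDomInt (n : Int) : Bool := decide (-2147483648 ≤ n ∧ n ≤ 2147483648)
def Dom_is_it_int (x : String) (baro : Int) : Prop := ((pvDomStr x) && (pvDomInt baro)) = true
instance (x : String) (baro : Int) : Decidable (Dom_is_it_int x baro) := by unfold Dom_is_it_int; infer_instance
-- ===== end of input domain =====

-- B replaces A's "build [str(1),…,str(baro)] and scan it" by a direct check that x is a canonical
-- decimal numeral (digits only, no leading zero) with value between 1 and baro.

-- ===== PORT A =====
-- A's second loop: 'for i in range(len(allow)): if x == allow[i]: return True' then 'return False'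
def pvLoopA (x : String) (allow : List String) : List Int → Bool
  | [] => false
  | i :: rest => if x == PySem.List.pyGetD allow i "" then true else pvLoopA x allow rest

def is_it_int (x : String) (baro : Int) : Bool :=
  let allow := (PySem.List.pyRange 1 (baro + 1)).foldl (fun acc i => acc ++ [PySem.Int.toStr i]) []
  pvLoopA x allow (PySem.List.pyRange 0 (allow.length : Int))

-- ===== PORT B =====
-- ord(c) - 48
def pvDigitVal (c : Char) : Int := (c.toNat : Int) - 48

-- B's loop: 'for c in x: if c < '0' or c > '9': return False; n = 10*n + (ord(c)-48)' then 'return n <= baro'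
def pvLoopB (baro : Int) : List Char → Int → Bool
  | [], n => decide (n ≤ baro)
  | c :: rest, n => if c < '0' ∨ '9' < c then false else pvLoopB baro rest (10 * n + pvDigitVal c)

def is_it_int_alt (x : String) (baro : Int) : Bool :=
  if baro < 1 then false
  else
    match x.toList with
    | [] => false
    | c :: _ => if c = '0' then false else pvLoopB baro x.toList 0

-- ===== PRECONDITION & SPEC =====
def Spec_is_it_int (x : String) (baro : Int) (out : Bool) : Prop := out = is_it_int_alt x baro
instance (x : String) (baro : Int) (out : Bool) : Decidable (Spec_is_it_int x baro out) := by unfold Spec_is_it_int; infer_instance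

-- ===== CLAIM (what is proved, stated in full; the proofs are below) =====
def Claim_equal_is_it_int : Prop := ∀ (x : String) (baro : Int), Dom_is_it_int x baro → Spec_is_it_int x baro (is_it_int x baro)

-- ===== LEMMAS AND PROOFS =====

-- msd-first decimal digit list: the list `Nat.toDigits 10` produces, in structural form
def pvRep (k : Nat) : List Char :=
  if k < 10 then [Nat.digitChar k] else pvRep (k / 10) ++ [Nat.digitChar (k % 10)]
decreasing_by exact Nat.div_lt_self (by omega) (by omega)

def pvVal (cs : List Char) (n : Int) : Int := cs.foldl (fun a c => 10 * a + pvDigitVal c) n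

def pvIsDig (c : Char) : Bool := decide ('0' ≤ c ∧ c ≤ '9')

theorem pvRep_ne_nil (k : Nat) : pvRep k ≠ [] := by
  rw [pvRep]; split <;> simp

theorem pv_toDigitsCore_eq : ∀ (f n : Nat) (ds : List Char), n < f →
    Nat.toDigitsCore 10 f n ds = pvRep n ++ ds := by
  intro f
  induction f with
  | zero => omega
  | succ f ih =>
    intro n ds h
    rw [Nat.toDigitsCore]
    by_cases h10 : n < 10
    · have h0 : n / 10 = 0 := Nat.div_eq_of_lt h10
      have hm : n % 10 = n := Nat.mod_eq_of_lt h10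
      conv_rhs => rw [pvRep]
      simp [h0, hm, if_pos h10]
    · have hne : n / 10 ≠ 0 := by intro h0; exact h10 (by omega)
      simp only [if_neg hne]
      rw [ih (n / 10) _ (by omega)]
      conv_rhs => rw [pvRep, if_neg h10]
      simp

theorem pv_toChars_pos (i : Int) (h : 1 ≤ i) : PySem.Int.toChars i = pvRep i.toNat := by
  unfold PySem.Int.toChars
  rw [if_neg (by omega)]
  rw [Nat.toDigits, pv_toDigitsCore_eq _ _ _ (Nat.lt_succ_self _)]
  simp

theorem pvIsDig_digitChar (d : Nat) (h : d < 10) : pvIsDig (Nat.digitChar d) = true := by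
  interval_cases d <;> decide

theorem pvDigitVal_digitChar (d : Nat) (h : d < 10) : pvDigitVal (Nat.digitChar d) = (d : Int) := by
  interval_cases d <;> decide

theorem pv_toNat_bounds (c : Char) (h : pvIsDig c = true) : 48 ≤ c.toNat ∧ c.toNat ≤ 57 := by
  simp [pvIsDig, Char.le_def, UInt32.le_iff_toNat_le] at h
  exact ⟨h.1, h.2⟩

theorem pv_digitChar_of_dig (c : Char) (h : pvIsDig c = true) :
    Nat.digitChar (c.toNat - 48) = c := by
  obtain ⟨h1, h2⟩ := pv_toNat_bounds c h
  have hc := Char.ofNat_toNat c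
  have : c.toNat = 48 ∨ c.toNat = 49 ∨ c.toNat = 50 ∨ c.toNat = 51 ∨ c.toNat = 52 ∨ c.toNat = 53
      ∨ c.toNat = 54 ∨ c.toNat = 55 ∨ c.toNat = 56 ∨ c.toNat = 57 := by omega
  rcases this with h|h|h|h|h|h|h|h|h|h <;> rw [h] at hc ⊢ <;> rw [← hc] <;> decide

theorem pv_toNat_ne_zero (c : Char) (hd : pvIsDig c = true) (h0 : c ≠ '0') : 49 ≤ c.toNat := by
  obtain ⟨h1, h2⟩ := pv_toNat_bounds c hd
  rcases Nat.eq_or_lt_of_le h1 with he | hlt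
  · exact absurd (by have hc := Char.ofNat_toNat c; rw [← he] at hc; exact hc.symm) h0
  · omega

theorem pvRep_all_dig (k : Nat) : (pvRep k).all pvIsDig = true := by
  induction k using Nat.strong_induction_on with
  | _ k ih =>
    rw [pvRep]
    by_cases h : k < 10
    · simp [if_pos h, pvIsDig_digitChar k h]
    · rw [if_neg h]
      simp [List.all_append, ih (k / 10) (Nat.div_lt_self (by omega) (by omega)),
        pvIsDig_digitChar (k % 10) (Nat.mod_lt _ (by omega))]

theorem pvRep_head (k : Nat) (h : 1 ≤ k) : ∀ c, (pvRep k).head? = some c → c ≠ '0' := by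
  induction k using Nat.strong_induction_on with
  | _ k ih =>
    rw [pvRep]
    by_cases h10 : k < 10
    · rw [if_pos h10]
      intro c hc
      simp at hc
      subst hc
      interval_cases k <;> decide
    · rw [if_neg h10]
      intro c hc
      have hne := pvRep_ne_nil (k / 10)
      cases hrep : pvRep (k / 10) with
      | nil => exact absurd hrep hne
      | cons a t =>
        rw [hrep] at hc
        simp at hc
        subst hc
        exact ih (k / 10) (Nat.div_lt_self (by omega) (by omega)) (by omega) a (by rw [hrep]; rfl)

theorem pvVal_append (ds : List Char) (c : Char) (n : Int) :
    pvVal (ds ++ [c]) n = 10 * pvVal ds n + pvDigitVal c := by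
  simp [pvVal, List.foldl_append]

theorem pvVal_rep (k : Nat) : pvVal (pvRep k) 0 = (k : Int) := by
  induction k using Nat.strong_induction_on with
  | _ k ih =>
    rw [pvRep]
    by_cases h : k < 10
    · simp [if_pos h, pvVal, pvDigitVal_digitChar k h]
    · rw [if_neg h, pvVal_append, ih (k / 10) (Nat.div_lt_self (by omega) (by omega)),
        pvDigitVal_digitChar (k % 10) (Nat.mod_lt _ (by omega))]
      have := Nat.div_add_mod k 10
      push_cast
      omega

theorem pvLoopB_eq (baro : Int) : ∀ (cs : List Char) (n : Int),
    pvLoopB baro cs n = (cs.all pvIsDig && decide (pvVal cs n ≤ baro)) := by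
  intro cs
  induction cs with
  | nil => intro n; simp [pvLoopB, pvVal]
  | cons c rest ih =>
    intro n
    rw [pvLoopB]
    have hiff : (¬ (c < '0' ∨ '9' < c)) ↔ ('0' ≤ c ∧ c ≤ '9') := by
      rw [not_or, not_lt, not_lt]
    by_cases hd : pvIsDig c
    · rw [if_neg (hiff.mpr (by simpa [pvIsDig] using hd)), ih]
      simp only [pvVal, List.all_cons, hd, Bool.true_and, List.foldl_cons]
      rfl
    · have hcond : c < '0' ∨ '9' < c := by
        by_contra hno
        exact hd (by simp [pvIsDig]; exact hiff.mp hno)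
      rw [if_pos hcond]
      simp [hd]

theorem pvRep_val_inv : ∀ (ds : List Char), ds.all pvIsDig = true →
    (∀ c, ds.head? = some c → c ≠ '0') → ds ≠ [] →
    1 ≤ pvVal ds 0 ∧ pvRep (pvVal ds 0).toNat = ds := by
  intro ds
  induction ds using List.reverseRecOn with
  | nil => intro _ _ h; exact absurd rfl h
  | append_singleton ds' c ih =>
    intro hall hhead _
    rw [List.all_append] at hall
    simp only [List.all_cons, List.all_nil, Bool.and_eq_true, Bool.and_true] at hall
    obtain ⟨hall', hc⟩ := hall
    obtain ⟨hb1, hb2⟩ := pv_toNat_bounds c hc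
    cases ds' with
    | nil =>
      have h0 : c ≠ '0' := hhead c rfl
      have h49 := pv_toNat_ne_zero c hc h0
      simp only [List.nil_append]
      have hv : pvVal [c] 0 = pvDigitVal c := by simp [pvVal]
      rw [hv]
      have h1 : (1 : Int) ≤ pvDigitVal c := by unfold pvDigitVal; omega
      refine ⟨h1, ?_⟩
      have hlt : (pvDigitVal c).toNat < 10 := by unfold pvDigitVal; omega
      rw [pvRep, if_pos hlt]
      have : (pvDigitVal c).toNat = c.toNat - 48 := by unfold pvDigitVal; omega
      rw [this, pv_digitChar_of_dig c hc]
    | cons a t =>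
      have hds' : (a :: t : List Char) ≠ [] := by simp
      have hhead' : ∀ c', (a :: t : List Char).head? = some c' → c' ≠ '0' := by
        intro c' h'
        apply hhead
        simpa using h'
      obtain ⟨hm1, hmrep⟩ := ih hall' hhead' hds'
      set m := pvVal (a :: t) 0 with hm
      rw [pvVal_append]
      have hK1 : (1 : Int) ≤ 10 * m + pvDigitVal c := by unfold pvDigitVal; omega
      refine ⟨hK1, ?_⟩
      have hKnat : (10 * m + pvDigitVal c).toNat = 10 * m.toNat + (c.toNat - 48) := by
        unfold pvDigitVal; omega
      rw [pvRep]
      rw [if_neg (by omega)]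
      have hdiv : (10 * m.toNat + (c.toNat - 48)) / 10 = m.toNat := by omega
      have hmod : (10 * m.toNat + (c.toNat - 48)) % 10 = c.toNat - 48 := by omega
      rw [hKnat, hdiv, hmod, hmrep, pv_digitChar_of_dig c hc]

theorem pvLoopA_any (x : String) (allow : List String) : ∀ l : List Int,
    pvLoopA x allow l = l.any (fun i => x == PySem.List.pyGetD allow i "") := by
  intro l
  induction l with
  | nil => rfl
  | cons i rest ih =>
    rw [pvLoopA, List.any_cons, ih]
    by_cases h : x = PySem.List.pyGetD allow i "" <;> simp [h]

theorem pv_A_char (x : String) (baro : Int) :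
    is_it_int x baro = true ↔ ∃ i : Int, 1 ≤ i ∧ i ≤ baro ∧ x = PySem.Int.toStr i := by
  unfold is_it_int
  rw [PySem.List.foldl_append_singleton_eq_map, List.nil_append, pvLoopA_any]
  set allow := (PySem.List.pyRange 1 (baro + 1)).map PySem.Int.toStr with hallow
  rw [show ((allow.length : Int)) = ((allow.length : Nat) : Int) from rfl,
    PySem.List.pyRange_zero_natCast]
  simp only [List.any_map, List.any_eq_true, List.mem_range, Function.comp]
  constructor
  · rintro ⟨j, hj, hx⟩
    rw [PySem.List.pyGetD_natCast] at hx
    have hx' : x = allow.getD j "" := by simpa using hx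
    have hmem : allow.getD j "" ∈ allow := by
      rw [List.getD_eq_getElem _ _ hj]
      exact List.getElem_mem _
    rw [← hx'] at hmem
    rw [hallow, List.mem_map] at hmem
    obtain ⟨i, hi, hxi⟩ := hmem
    rw [PySem.List.mem_pyRange_one] at hi
    exact ⟨i, hi.1, by omega, hxi.symm⟩
  · rintro ⟨i, h1, h2, rfl⟩
    have hmem : PySem.Int.toStr i ∈ allow := by
      rw [hallow, List.mem_map]
      exact ⟨i, PySem.List.mem_pyRange_one.mpr ⟨h1, by omega⟩, rfl⟩
    obtain ⟨j, hj, hxj⟩ := List.getElem_of_mem hmem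
    refine ⟨j, hj, ?_⟩
    rw [PySem.List.pyGetD_natCast, List.getD_eq_getElem _ _ hj, hxj]
    exact beq_self_eq_true _

-- ===== VERDICT (by name: the statement is the Claim_ definition above) =====
theorem is_it_int_spec : Claim_equal_is_it_int := by
  intro x baro _
  unfold Spec_is_it_int
  rw [Bool.eq_iff_iff]
  constructor
  · intro hA
    rw [pv_A_char] at hA
    obtain ⟨i, h1, h2, rfl⟩ := hA
    unfold is_it_int_alt
    rw [if_neg (by omega : ¬ baro < 1)]
    have hlist : (PySem.Int.toStr i).toList = pvRep i.toNat := by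
      rw [PySem.Int.toList_toStr, pv_toChars_pos i h1]
    cases hrep : pvRep i.toNat with
    | nil => exact absurd hrep (pvRep_ne_nil _)
    | cons c rest =>
      rw [hlist, hrep]
      have hc0 : c ≠ '0' := pvRep_head i.toNat (by omega) c (by rw [hrep]; rfl)
      show (if c = '0' then false else pvLoopB baro (c :: rest) 0) = true
      rw [if_neg hc0, ← hrep, pvLoopB_eq, pvRep_all_dig, pvVal_rep]
      simp only [Bool.true_and, decide_eq_true_eq]
      rw [Int.toNat_of_nonneg (by omega)]
      exact h2
  · intro hB
    unfold is_it_int_alt at hB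
    by_cases hb : baro < 1
    · rw [if_pos hb] at hB
      exact absurd hB (by simp)
    rw [if_neg hb] at hB
    cases hx : x.toList with
    | nil =>
      rw [hx] at hB
      exact absurd hB (by simp)
    | cons c rest =>
      rw [hx] at hB
      have hB' : (if c = '0' then false else pvLoopB baro (c :: rest) 0) = true := hB
      by_cases hc : c = '0'
      · rw [if_pos hc] at hB'
        exact absurd hB' (by simp)
      rw [if_neg hc, pvLoopB_eq] at hB'
      simp only [Bool.and_eq_true, decide_eq_true_eq] at hB'
      obtain ⟨hall, hle⟩ := hB'
      have hhead : ∀ c', (c :: rest : List Char).head? = some c' → c' ≠ '0' := by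
        intro c' h'
        simp at h'
        subst h'
        exact hc
      obtain ⟨h1, hrep⟩ := pvRep_val_inv (c :: rest) hall hhead (by simp)
      rw [pv_A_char]
      refine ⟨pvVal (c :: rest) 0, h1, hle, ?_⟩
      apply String.toList_inj.mp
      rw [hx, PySem.Int.toList_toStr, pv_toChars_pos _ h1, hrep]
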